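-- pv_equiv track=rewrite | github.com/HMAjay/KCET-College-Predictor | src/model/predictor.py | _repair_broken_tokens
-- ===== SOURCE A (Python) =====
-- WORD_JOIN_CANDIDATES = {
--     "artificial",
--     "computer",
--     "engineering",
--     "information",
--     "electronics",
--     "electrical",
--     "communication",
--     "intelligence",
--     "learning",
--     "mechanical",
-- }
--
-- def _repair_broken_tokens(tokens: list[str]) -> list[str]:
--     repaired = []
--     i = 0
--     while i < len(tokens):
--         token = tokens[i]
--         next_token = tokens[i + 1] if i + 1 < len(tokens) else ""
--
--         if next_token and len(next_token) == 1:
--             merged = token + next_token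
--             if merged in WORD_JOIN_CANDIDATES:
--                 repaired.append(merged)
--                 i += 2
--                 continue
--
--         repaired.append(token)
--         i += 1
--
--     return repaired
-- ===== SOURCE B (Python) =====
-- WORD_JOIN_CANDIDATES = {
--     "artificial",
--     "computer",
--     "engineering",
--     "information",
--     "electronics",
--     "electrical",
--     "communication",
--     "intelligence",
--     "learning",
--     "mechanical",
-- }
--
-- def _repair_broken_tokens(tokens: list[str]) -> list[str]:
--     repaired = []
--     for token in tokens:
--         if len(token) == 1 and repaired and repaired[-1] + token in WORD_JOIN_CANDIDATES:
--             repaired[-1] = repaired[-1] + token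
--         else:
--             repaired.append(token)
--     return repaired
-- ===== Notes on version B (the rewrite author's own statement) =====
-- stated objective: simpler
-- what changed: Replaced the explicit-index while loop with i+=1/i+=2 lookahead by a single forward for-loop that uses the output list as a stack, merging a length-1 token backward into the last emitted token.
import Mathlib
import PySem

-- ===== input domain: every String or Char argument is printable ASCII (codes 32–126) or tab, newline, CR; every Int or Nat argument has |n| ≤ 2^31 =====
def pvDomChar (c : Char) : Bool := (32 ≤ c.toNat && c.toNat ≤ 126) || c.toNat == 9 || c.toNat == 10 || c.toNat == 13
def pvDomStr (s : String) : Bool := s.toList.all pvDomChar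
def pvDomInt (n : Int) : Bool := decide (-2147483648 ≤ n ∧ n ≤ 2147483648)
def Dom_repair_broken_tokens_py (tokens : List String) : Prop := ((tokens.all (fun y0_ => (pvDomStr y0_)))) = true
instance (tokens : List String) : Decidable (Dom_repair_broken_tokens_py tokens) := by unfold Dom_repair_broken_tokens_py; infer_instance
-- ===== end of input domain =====

-- B replaces A's index-with-lookahead while loop by a single forward pass that treats the
-- output as a stack, merging a length-1 token backward into the last emitted token (objective: simpler).

-- WORD_JOIN_CANDIDATES (the module-level set; membership = equality with one of these literals)
def pvCAND : List String :=
  ["artificial", "computer", "engineering", "information", "electronics",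
   "electrical", "communication", "intelligence", "learning", "mechanical"]

-- ===== PORT A =====
-- while loop with index i: at i, peek tokens[i+1] (the "" default when i+1 is past the end
-- makes the merge test fail, so the one-token tail appends the token and stops).
def repair_broken_tokens_py (tokens : List String) : List String :=
  match tokens with
  | [] => []
  | [token] => [token]   -- next_token = "": the 'if next_token' guard fails, append token, i += 1
  | token :: next :: rest =>
      if next ≠ "" ∧ PySem.Str.len next = 1 ∧ (token ++ next) ∈ pvCAND then
        (token ++ next) :: repair_broken_tokens_py rest          -- i += 2
      else
        token :: repair_broken_tokens_py (next :: rest)          -- i += 1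

-- ===== PORT B =====
-- one fold; repaired[-1] is PySem.List.pyGetD repaired (-1) "", in-place update of the last slot
def pvStepB (repaired : List String) (token : String) : List String :=
  if PySem.Str.len token = 1 ∧ repaired ≠ [] ∧
      (PySem.List.pyGetD repaired (-1) "" ++ token) ∈ pvCAND then
    repaired.dropLast ++ [PySem.List.pyGetD repaired (-1) "" ++ token]
  else
    repaired ++ [token]

def repair_broken_tokens_py_alt (tokens : List String) : List String :=
  tokens.foldl pvStepB []

-- ===== PRECONDITION & SPEC =====
def Spec_repair_broken_tokens_py (tokens : List String) (out : List String) : Prop := out = repair_broken_tokens_py_alt tokens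
instance (tokens : List String) (out : List String) : Decidable (Spec_repair_broken_tokens_py tokens out) := by unfold Spec_repair_broken_tokens_py; infer_instance

-- ===== CLAIM (what is proved, stated in full; the proofs are below) =====
def Claim_equal_repair_broken_tokens_py : Prop := ∀ (tokens : List String), Dom_repair_broken_tokens_py tokens → Spec_repair_broken_tokens_py tokens (repair_broken_tokens_py tokens)

-- ===== LEMMAS AND PROOFS =====

-- no candidate is a candidate extended by one character (base length ≥ 8 and no off-by-one prefix pairs)
lemma pv_key_chars (w v : String) (hw : w ∈ pvCAND) (hv : v ∈ pvCAND) (c : Char)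
    (h : w.toList ++ [c] = v.toList) : False := by
  fin_cases hw <;> fin_cases hv <;> simp_all

lemma pv_len_one_toList (t : String) (h : PySem.Str.len t = 1) : ∃ c, t.toList = [c] := by
  have : t.toList.length = 1 := by simpa [PySem.Str.len_eq] using h
  exact List.length_eq_one_iff.mp this

lemma pv_key (w t : String) (hw : w ∈ pvCAND) (ht : PySem.Str.len t = 1) :
    (w ++ t) ∉ pvCAND := by
  intro hv
  obtain ⟨c, hc⟩ := pv_len_one_toList t ht
  exact pv_key_chars w (w ++ t) hw hv c (by simp [String.toList_append, hc])

lemma pv_len_one_ne_empty (t : String) (h : PySem.Str.len t = 1) : t ≠ "" := by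
  obtain ⟨c, hc⟩ := pv_len_one_toList t h
  intro he; rw [he] at hc; simp at hc

-- the invariant: if the first token of the remaining input cannot merge with acc's last element,
-- B's fold from acc produces acc ++ A's result on the remaining input
lemma pv_main : ∀ (tokens acc : List String),
    (∀ t, tokens.head? = some t →
      ¬ (PySem.Str.len t = 1 ∧ acc ≠ [] ∧ (PySem.List.pyGetD acc (-1) "" ++ t) ∈ pvCAND)) →
    tokens.foldl pvStepB acc = acc ++ repair_broken_tokens_py tokens
  | [], acc, _ => by simp [repair_broken_tokens_py]
  | [t], acc, h => by
      simp only [List.foldl_cons, List.foldl_nil, repair_broken_tokens_py]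
      rw [pvStepB, if_neg (h t rfl)]
  | t :: n :: rest, acc, h => by
      rw [List.foldl_cons, show pvStepB acc t = acc ++ [t] from by rw [pvStepB, if_neg (h t rfl)]]
      by_cases hm : n ≠ "" ∧ PySem.Str.len n = 1 ∧ (t ++ n) ∈ pvCAND
      · -- A merges t and n; B merges n backward into the just-appended t
        rw [List.foldl_cons, show pvStepB (acc ++ [t]) n = acc ++ [t ++ n] from by
          rw [pvStepB, if_pos]
          · simp [PySem.List.pyGetD_neg_one_append_singleton]
          · refine ⟨hm.2.1, by simp, ?_⟩
            simpa [PySem.List.pyGetD_neg_one_append_singleton] using hm.2.2]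
        rw [pv_main rest (acc ++ [t ++ n]) ?_,
          show repair_broken_tokens_py (t :: n :: rest)
              = (t ++ n) :: repair_broken_tokens_py rest from by
            rw [repair_broken_tokens_py, if_pos hm]]
        · simp
        · intro r _ hc
          exact pv_key (t ++ n) r hm.2.2 hc.1
            (by simpa [PySem.List.pyGetD_neg_one_append_singleton] using hc.2.2)
      · -- A appends t alone; B's next step sees t as the last element and cannot merge either
        rw [pv_main (n :: rest) (acc ++ [t]) ?_,
          show repair_broken_tokens_py (t :: n :: rest)
              = t :: repair_broken_tokens_py (n :: rest) from by
            rw [repair_broken_tokens_py, if_neg hm]]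
        · simp
        · intro r hr hc
          obtain rfl : n = r := by simpa using hr
          refine hm ⟨pv_len_one_ne_empty n hc.1, hc.1, ?_⟩
          simpa [PySem.List.pyGetD_neg_one_append_singleton] using hc.2.2

-- ===== VERDICT (by name: the statement is the Claim_ definition above) =====
theorem repair_broken_tokens_py_spec : Claim_equal_repair_broken_tokens_py := by
  intro tokens _
  show repair_broken_tokens_py tokens = repair_broken_tokens_py_alt tokens
  rw [repair_broken_tokens_py_alt, pv_main tokens [] (by intro t _ hc; exact hc.2.1 rfl)]
  simp
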